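-- pv_equiv track=rewrite | github.com/danesherbs/bitblaster-16 | test_gates.py | _make_one_hot
-- ===== SOURCE A (Python) =====
-- def _make_one_hot(n: int, i: int) -> tuple:
--     """Returns an `n`-bit tuple of bools with a single `True` at index `i`."""
--     assert n >= 1 and isinstance(n, int), "`n` must be a positive integer"
--     assert i >= 0 and i < n and isinstance(i, int), "`i` must be an integer in [0, n)"
--     out = tuple(j == i for j in range(n))
--     assert (
--         isinstance(out, tuple)
--         and len(out) == n
--         and all(isinstance(x, bool) for x in out)
--     ), "output must be an `n`-bit tuple of bools"
--     return out
-- ===== SOURCE B (Python) =====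
-- def _make_one_hot(n: int, i: int) -> tuple:
--     """Returns an `n`-bit tuple of bools with a single `True` at index `i`."""
--     assert n >= 1 and isinstance(n, int), "`n` must be a positive integer"
--     assert i >= 0 and i < n and isinstance(i, int), "`i` must be an integer in [0, n)"
--     out = (False,) * i + (True,) + (False,) * (n - i - 1)
--     assert (
--         isinstance(out, tuple)
--         and len(out) == n
--         and all(isinstance(x, bool) for x in out)
--     ), "output must be an `n`-bit tuple of bools"
--     return out
-- ===== Notes on version B (the rewrite author's own statement) =====
-- stated objective: idiomatic
-- what changed: Builds the one-hot tuple by concatenating two repeated-False slabs around a single True literal instead of looping over range(n) and comparing each index to i.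
import Mathlib
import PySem

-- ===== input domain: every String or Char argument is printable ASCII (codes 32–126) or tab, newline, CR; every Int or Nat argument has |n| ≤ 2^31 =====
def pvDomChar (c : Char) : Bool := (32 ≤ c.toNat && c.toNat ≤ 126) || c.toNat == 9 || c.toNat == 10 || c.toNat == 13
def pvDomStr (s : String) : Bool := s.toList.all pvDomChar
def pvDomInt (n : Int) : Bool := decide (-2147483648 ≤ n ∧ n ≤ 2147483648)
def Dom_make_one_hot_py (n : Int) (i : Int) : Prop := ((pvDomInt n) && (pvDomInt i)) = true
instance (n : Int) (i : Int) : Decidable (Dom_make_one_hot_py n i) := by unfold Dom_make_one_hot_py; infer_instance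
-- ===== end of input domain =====

-- B builds the one-hot list as replicate-False ++ [True] ++ replicate-False instead of mapping an equality test over range(n); objective: idiomatic, same cost.
-- ===== PORT A =====
-- out = tuple(j == i for j in range(n))
def make_one_hot_py (n : Int) (i : Int) : List Bool :=
  (PySem.List.pyRange 0 n 1).map (fun j => j == i)

-- ===== PORT B =====
-- out = (False,) * i + (True,) + (False,) * (n - i - 1)
def make_one_hot_py_alt (n : Int) (i : Int) : List Bool :=
  List.replicate i.toNat false ++ [true] ++ List.replicate (n - i - 1).toNat false

-- ===== PRECONDITION & SPEC =====
-- Pre_ excludes exactly the inputs on which A's input assertions raise AssertionError.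
def Pre_make_one_hot_py (n : Int) (i : Int) : Prop := 1 ≤ n ∧ 0 ≤ i ∧ i < n
instance (n : Int) (i : Int) : Decidable (Pre_make_one_hot_py n i) := by unfold Pre_make_one_hot_py; infer_instance
def pvWitness_make_one_hot_py : Int × Int := (4, 2)
def Spec_make_one_hot_py (n : Int) (i : Int) (out : List Bool) : Prop := out = make_one_hot_py_alt n i
instance (n : Int) (i : Int) (out : List Bool) : Decidable (Spec_make_one_hot_py n i out) := by unfold Spec_make_one_hot_py; infer_instance

-- ===== CLAIM (what is proved, stated in full; the proofs are below) =====
def Claim_equal_make_one_hot_py : Prop := ∀ (n : Int) (i : Int), Dom_make_one_hot_py n i → Pre_make_one_hot_py n i → Spec_make_one_hot_py n i (make_one_hot_py n i)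

-- ===== LEMMAS AND PROOFS =====

-- key lemma: mapping the equality test over 0..n'-1 yields replicate/true/replicate
theorem one_hot_range (n' m : Nat) (hm : m < n') :
    ((List.range n').map (fun k : Nat => ((k : Int) == (m : Int)))) =
      List.replicate m false ++ [true] ++ List.replicate (n' - m - 1) false := by
  apply List.ext_getElem
  · simp; omega
  · intro k hk hk'
    rw [List.getElem_map, List.getElem_range]
    rcases lt_trichotomy k m with h | h | h
    · rw [List.getElem_append_left (by simp; omega)]
      rw [List.getElem_append_left (by simpa using h), List.getElem_replicate]
      simpa using (by omega : ¬ ((k : Int) = (m : Int)))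
    · subst h
      rw [List.getElem_append_left (by simp), List.getElem_append_right (by simp)]
      simp
    · rw [List.getElem_append_right (by simp; omega), List.getElem_replicate]
      simpa using (by omega : ¬ ((k : Int) = (m : Int)))

-- ===== VERDICT (by name: the statement is the Claim_ definition above) =====
theorem make_one_hot_py_spec : Claim_equal_make_one_hot_py := by
  intro n i _ ⟨hn, hi0, hin⟩
  unfold Spec_make_one_hot_py make_one_hot_py make_one_hot_py_alt
  rw [PySem.List.pyRange_one, List.map_map]
  have h1 : (n - 0).toNat = n.toNat := by omega
  have h2 : (n - i - 1).toNat = n.toNat - i.toNat - 1 := by omega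
  have h3 : i = (i.toNat : Int) := by omega
  rw [h1, h2, h3]
  have hf : ((fun j => j == ((i.toNat : Nat) : Int)) ∘ fun k : Nat => (0 : Int) + (k : Int))
      = fun k : Nat => ((k : Int) == ((i.toNat : Nat) : Int)) := by
    funext k; simp
  rw [hf]
  exact one_hot_range n.toNat i.toNat (by omega)
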